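-- pv_equiv track=rewrite | github.com/jannajchan/python | forMyKnowledge/StringIndexingAndSearching.py | mask_except_first
-- ===== SOURCE A (Python) =====
-- def mask_except_first(s: str, target: str) -> str:
--     wordList = s.split()
--     seenFlag = False
--     result = []
--     for word in wordList:
--         if word == target:
--             if not seenFlag:
--                 result.append(word) # Keep the first match
--                 seenFlag = True     # Mark that we've already seen it
--             else:
--                 result.append("*")  # Replace later matches
--         else:
--             result.append(word)     # Keep other words unchanged
--     return " ".join(result)
-- ===== SOURCE B (Python) =====
-- def mask_except_first(s: str, target: str) -> str:
--     words = s.split()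
--     try:
--         i = words.index(target)
--     except ValueError:
--         return " ".join(words)
--     return " ".join(words[:i+1] + ["*" if w == target else w for w in words[i+1:]])
-- ===== Notes on version B (the rewrite author's own statement) =====
-- stated objective: alternative
-- what changed: Replaces the running seen-flag loop with an index-first decomposition: locate the first occurrence once, keep the prefix up to and including it unchanged, and mask only the suffix with a comprehension.
import Mathlib
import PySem

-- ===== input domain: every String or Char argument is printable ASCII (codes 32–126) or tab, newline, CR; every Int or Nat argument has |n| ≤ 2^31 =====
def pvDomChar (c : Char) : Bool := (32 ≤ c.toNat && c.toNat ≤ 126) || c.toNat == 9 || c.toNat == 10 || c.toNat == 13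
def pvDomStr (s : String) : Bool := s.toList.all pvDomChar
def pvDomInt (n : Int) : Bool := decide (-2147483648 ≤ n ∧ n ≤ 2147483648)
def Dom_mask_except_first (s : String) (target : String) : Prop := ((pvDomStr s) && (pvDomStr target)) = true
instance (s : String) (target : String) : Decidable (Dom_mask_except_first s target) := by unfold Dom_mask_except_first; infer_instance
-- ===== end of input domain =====

-- B replaces A's running seen-flag loop by locating the first occurrence once and masking only the suffix after it (alternative decomposition, same cost).

-- ===== PORT A =====
-- A: split, then one pass with a seen flag, appending word or "*" to an accumulator.
def mask_except_first (s : String) (target : String) : String :=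
  let wordList := PySem.Str.split₀ s
  let st := wordList.foldl
    (fun (st : Bool × List String) word =>
      if word == target then
        if !st.1 then (true, st.2 ++ [word])
        else (st.1, st.2 ++ ["*"])
      else (st.1, st.2 ++ [word]))
    (false, [])
  PySem.Str.join " " st.2

-- ===== PORT B =====
-- B: split; find the index of the first match (none = ValueError branch); keep the
-- prefix through it, mask equal words in the suffix, join.
def mask_except_first_alt (s : String) (target : String) : String :=
  let words := PySem.Str.split₀ s
  match PySem.List.index? words target with
  | none => PySem.Str.join " " words
  | some i =>
      PySem.Str.join " "
        (PySem.List.slice words none (some ((i : Int) + 1)) ++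
          (PySem.List.slice words (some ((i : Int) + 1)) none).map
            (fun w => if w == target then "*" else w))

-- ===== PRECONDITION & SPEC =====
def Spec_mask_except_first (s : String) (target : String) (out : String) : Prop := out = mask_except_first_alt s target
instance (s : String) (target : String) (out : String) : Decidable (Spec_mask_except_first s target out) := by unfold Spec_mask_except_first; infer_instance

-- ===== CLAIM (what is proved, stated in full; the proofs are below) =====
def Claim_equal_mask_except_first : Prop := ∀ (s : String) (target : String), Dom_mask_except_first s target → Spec_mask_except_first s target (mask_except_first s target)

-- ===== LEMMAS AND PROOFS =====

-- A's loop after the flag is set: every remaining match becomes "*".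
theorem maskA_foldl_true (t : String) :
    ∀ (ws acc : List String),
      ws.foldl
        (fun (st : Bool × List String) word =>
          if word == t then
            if !st.1 then (true, st.2 ++ [word]) else (st.1, st.2 ++ ["*"])
          else (st.1, st.2 ++ [word]))
        (true, acc)
      = (true, acc ++ ws.map (fun w => if w == t then "*" else w)) := by
  intro ws
  induction ws with
  | nil => intro acc; simp
  | cons h tl ih =>
    intro acc
    by_cases hh : h = t
    · subst hh
      simp only [List.foldl_cons, BEq.rfl, if_true, Bool.not_true, Bool.false_eq_true, if_false, ih]
      simp
    · have hb : (h == t) = false := by simpa using hh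
      simp only [List.foldl_cons, hb, Bool.false_eq_true, if_false, ih]
      simp [hh]

-- A's loop from the unset flag equals B's index-split form, for any list of words.
theorem maskA_eq_maskB (t : String) :
    ∀ (ws acc : List String),
      (ws.foldl
        (fun (st : Bool × List String) word =>
          if word == t then
            if !st.1 then (true, st.2 ++ [word]) else (st.1, st.2 ++ ["*"])
          else (st.1, st.2 ++ [word]))
        (false, acc)).2
      = acc ++
        (match PySem.List.index? ws t with
         | none => ws
         | some i => ws.take (i + 1) ++ (ws.drop (i + 1)).map (fun w => if w == t then "*" else w)) := by
  intro ws
  induction ws with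
  | nil => intro acc; simp [PySem.List.index?]
  | cons h tl ih =>
    intro acc
    by_cases hh : h = t
    · subst hh
      rw [PySem.List.index?_cons_self]
      simp only [List.foldl_cons, BEq.rfl, if_true, Bool.not_false, maskA_foldl_true]
      simp
    · rw [PySem.List.index?_cons_of_ne tl hh]
      have hb : (h == t) = false := by simpa using hh
      simp only [List.foldl_cons, hb, Bool.false_eq_true, if_false, ih]
      cases hidx : PySem.List.index? tl t with
      | none => simp
      | some i => simp [List.take_succ_cons, List.drop_succ_cons]

-- ===== VERDICT (by name: the statement is the Claim_ definition above) =====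
theorem mask_except_first_spec : Claim_equal_mask_except_first := by
  intro s target _
  unfold Spec_mask_except_first mask_except_first mask_except_first_alt
  simp only
  rw [maskA_eq_maskB target (PySem.Str.split₀ s) []]
  cases hidx : PySem.List.index? (PySem.Str.split₀ s) target with
  | none => simp
  | some i =>
    have h1 : ((i : Int) + 1) = (((i + 1 : Nat) : Int)) := by push_cast; ring
    have h2 : PySem.List.slice (PySem.Str.split₀ s) none (some ((i : Int) + 1))
        = (PySem.Str.split₀ s).take (i + 1) := by
      rw [h1, PySem.List.slice_to_natCast]
    have h3 : PySem.List.slice (PySem.Str.split₀ s) (some ((i : Int) + 1)) none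
        = (PySem.Str.split₀ s).drop (i + 1) := by
      rw [h1, PySem.List.slice_from_natCast]
    simp [h2, h3]
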